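-- pv_equiv track=rewrite | github.com/cungbac/python | 1.DataScience/2.BigO/Green18/lec11_odd_even_sort.py | insertionSort_odd_even
-- ===== SOURCE A (Python) =====
-- def insertionSort_Asc(a):
--     if len(a) == 1:
--         return a
--     lst = [a[0]]
--     for j in range(1,len(a)):
--         lst.append(a[j])
--         key = a[j]
--         i = j
--         while i >= 0:
--             if i == 0:
--                 break
--             if lst[i-1] <= key:
--                 break
--             lst[i] = lst[i-1]
--             i -= 1
--         lst[i] = key
--     return lst
--
-- def insertionSort_Desc(a):
--     if len(a) == 1:
--         return a
--     lst = [a[0]]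
--     for j in range(1,len(a)):
--         lst.append(a[j])
--         key = a[j]
--         i = j
--         while i >= 0:
--             if i == 0:
--                 break
--             if lst[i-1] >= key:
--                 break
--             lst[i] = lst[i-1]
--             i -= 1
--         lst[i] = key
--     return lst
--
-- def insertionSort_odd_even(a):
--     b = []
--     idx_even = []
--     c = []
--     idx_odd = []
--
--     for i in range(len(a)):
--         if a[i] % 2 == 0:
--             b.append(a[i])
--             idx_even.append(i)
--         else:
--             c.append(a[i])
--             idx_odd.append(i)
--
--     if len(b) > 0:
--         b = insertionSort_Asc(b)
--         for i in range(len(idx_even)):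
--             a[idx_even[i]] = b[i]
--     if len(c) > 0:
--         c = insertionSort_Desc(c)
--         for i in range(len(idx_odd)):
--             a[idx_odd[i]] = c[i]
--     return a
-- ===== SOURCE B (Python) =====
-- def insertionSort_odd_even(a):
--     evens = sorted(x for x in a if x % 2 == 0)
--     odds = sorted((x for x in a if x % 2 != 0), reverse=True)
--     e = o = 0
--     for i in range(len(a)):
--         if a[i] % 2 == 0:
--             a[i] = evens[e]
--             e += 1
--         else:
--             a[i] = odds[o]
--             o += 1
--     return a
-- ===== Notes on version B (the rewrite author's own statement) =====
-- stated objective: simpler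
-- what changed: A hand-rolls two array-shifting insertion sorts and keeps parallel index lists to scatter the sorted values back; B just partitions the values by parity, calls sorted() (ascending for evens, descending for odds) and rebuilds the list in one pass driven by each slot's original parity.
import Mathlib
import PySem

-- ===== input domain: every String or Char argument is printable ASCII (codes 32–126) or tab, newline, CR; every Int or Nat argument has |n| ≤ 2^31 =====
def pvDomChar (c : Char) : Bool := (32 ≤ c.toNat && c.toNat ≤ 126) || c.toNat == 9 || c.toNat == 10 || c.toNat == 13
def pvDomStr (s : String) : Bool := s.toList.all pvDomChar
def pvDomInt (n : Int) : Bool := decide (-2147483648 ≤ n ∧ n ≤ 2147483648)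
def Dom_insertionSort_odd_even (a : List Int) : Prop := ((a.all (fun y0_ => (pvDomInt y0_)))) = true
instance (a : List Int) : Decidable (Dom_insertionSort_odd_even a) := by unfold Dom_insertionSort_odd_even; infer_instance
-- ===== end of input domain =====

-- B replaces A's hand-written insertion sorts and index bookkeeping by sorted() on the two
-- parity classes plus a single rebuilding pass (objective: simpler). Both A and B mutate the
-- argument list in place in Python; the equivalence proved here is about the returned value.

-- ===== PORT A =====
-- inner while loop of insertionSort_Asc: state (lst, i); lst[i-1] is always in range, ported with getD.
def pvAscWhile (lst : List Int) (key : Int) : Nat → List Int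
  | 0 => lst.set 0 key
  | i + 1 =>
    if lst.getD i 0 ≤ key then lst.set (i + 1) key
    else pvAscWhile (lst.set (i + 1) (lst.getD i 0)) key i

-- insertionSort_Asc; A only calls it on nonempty lists, so lst = [a[0]] is ported with headD.
def pvInsertionSort_Asc (a : List Int) : List Int :=
  if a.length == 1 then a
  else
    (List.range' 1 (a.length - 1)).foldl
      (fun lst j => pvAscWhile (lst ++ [a.getD j 0]) (a.getD j 0) j) [a.headD 0]

-- inner while loop of insertionSort_Desc
def pvDescWhile (lst : List Int) (key : Int) : Nat → List Int
  | 0 => lst.set 0 key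
  | i + 1 =>
    if key ≤ lst.getD i 0 then lst.set (i + 1) key
    else pvDescWhile (lst.set (i + 1) (lst.getD i 0)) key i

-- insertionSort_Desc; A only calls it on nonempty lists.
def pvInsertionSort_Desc (a : List Int) : List Int :=
  if a.length == 1 then a
  else
    (List.range' 1 (a.length - 1)).foldl
      (fun lst j => pvDescWhile (lst ++ [a.getD j 0]) (a.getD j 0) j) [a.headD 0]

def insertionSort_odd_even (a : List Int) : List Int :=
  -- first loop: partition values and their indices by parity
  let st := (List.range a.length).foldl
    (fun st i =>
      if a.getD i 0 % 2 == 0 then (st.1 ++ [a.getD i 0], st.2.1 ++ [i], st.2.2.1, st.2.2.2)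
      else (st.1, st.2.1, st.2.2.1 ++ [a.getD i 0], st.2.2.2 ++ [i]))
    (([], [], [], []) : List Int × List Nat × List Int × List Nat)
  let b := st.1
  let idxE := st.2.1
  let c := st.2.2.1
  let idxO := st.2.2.2
  -- scatter the ascending evens back (indices are in range, set is exact there)
  let a1 := if b.length > 0 then
      let b' := pvInsertionSort_Asc b
      (List.range idxE.length).foldl (fun acc i => acc.set (idxE.getD i 0) (b'.getD i 0)) a
    else a
  -- scatter the descending odds back
  if c.length > 0 then
    let c' := pvInsertionSort_Desc c
    (List.range idxO.length).foldl (fun acc i => acc.set (idxO.getD i 0) (c'.getD i 0)) a1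
  else a1

-- ===== PORT B =====
-- the reconstruction pass of Source B: walk the list, pop the next sorted even/odd by slot parity
-- (the [] fallbacks are unreachable: the sorted lists hold exactly one value per slot of that parity)
def pvRebuild : List Int → List Int → List Int → List Int
  | [], _, _ => []
  | x :: xs, es, os =>
    if x % 2 == 0 then
      match es with
      | e :: es' => e :: pvRebuild xs es' os
      | [] => x :: xs
    else
      match os with
      | o :: os' => o :: pvRebuild xs es os'
      | [] => x :: xs

def insertionSort_odd_even_alt (a : List Int) : List Int :=
  pvRebuild a
    (PySem.List.sorted (a.filter (fun x => x % 2 == 0)) (fun x => x) false)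
    (PySem.List.sorted (a.filter (fun x => x % 2 != 0)) (fun x => x) true)

-- ===== PRECONDITION & SPEC =====
def Spec_insertionSort_odd_even (a : List Int) (out : List Int) : Prop := out = insertionSort_odd_even_alt a
instance (a : List Int) (out : List Int) : Decidable (Spec_insertionSort_odd_even a out) := by unfold Spec_insertionSort_odd_even; infer_instance

-- ===== CLAIM (what is proved, stated in full; the proofs are below) =====
def Claim_equal_insertionSort_odd_even : Prop := ∀ (a : List Int), Dom_insertionSort_odd_even a → Spec_insertionSort_odd_even a (insertionSort_odd_even a)

-- ===== LEMMAS AND PROOFS =====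

-- enumerate-with-index helper used only by the proofs
def pvEnum (k : Nat) : List Int → List (Nat × Int)
  | [] => []
  | x :: xs => (k, x) :: pvEnum (k + 1) xs

-- indices (from k) of the elements satisfying p
def pvPosOf (p : Int → Bool) (k : Nat) : List Int → List Nat
  | [] => []
  | x :: xs => if p x then k :: pvPosOf p (k + 1) xs else pvPosOf p (k + 1) xs

-- left-to-right "insert after all elements ≤ key" (what A's right-to-left shift computes on a sorted list)
def pvInsLe (key : Int) : List Int → List Int
  | [] => [key]
  | x :: xs => if x ≤ key then x :: pvInsLe key xs else key :: x :: xs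

-- descending twin: insert after all elements ≥ key
def pvInsGe (key : Int) : List Int → List Int
  | [] => [key]
  | x :: xs => if key ≤ x then x :: pvInsGe key xs else key :: x :: xs

theorem pvEnum_length (k : Nat) (l : List Int) : (pvEnum k l).length = l.length := by
  induction l generalizing k with
  | nil => rfl
  | cons x xs ih => simp [pvEnum, ih]

theorem pvEnum_getElem (k : Nat) (l : List Int) (j : Nat) (h : j < l.length)
    (h' : j < (pvEnum k l).length) : (pvEnum k l)[j] = (k + j, l[j]) := by
  induction l generalizing k j with
  | nil => simp at h
  | cons x xs ih =>
    cases j with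
    | zero => simp [pvEnum]
    | succ j =>
      simp only [pvEnum, List.getElem_cons_succ]
      rw [ih (k + 1) j (by simpa using h) (by simpa [pvEnum] using h')]
      simp; omega

theorem pv_enum_eq (l : List Int) :
    (List.range l.length).map (fun i => (i, l.getD i 0)) = pvEnum 0 l := by
  apply List.ext_getElem
  · simp [pvEnum_length]
  · intro j h1 h2
    have hj : j < l.length := by simpa using h1
    rw [pvEnum_getElem 0 l j hj h2]
    simp [List.getElem?_eq_getElem hj]

theorem pv_map_range_getD (l : List Int) :
    (List.range l.length).map (fun i => l.getD i 0) = l := by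
  apply List.ext_getElem
  · simp
  · intro j h1 h2
    have hj : j < l.length := by simpa using h1
    simp [List.getElem?_eq_getElem hj]

theorem pv_posOf_shift (p : Int → Bool) (k : Nat) (l : List Int) :
    pvPosOf p (k + 1) l = (pvPosOf p k l).map (· + 1) := by
  induction l generalizing k with
  | nil => rfl
  | cons x xs ih =>
    simp only [pvPosOf]
    by_cases h : p x <;> simp [h, ih (k + 1), ih k]

theorem pv_posOf_length (p : Int → Bool) (k : Nat) (l : List Int) :
    (pvPosOf p k l).length = (l.filter p).length := by
  induction l generalizing k with
  | nil => rfl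
  | cons x xs ih =>
    simp only [pvPosOf, List.filter]
    by_cases h : p x <;> simp [h, ih]

-- the partitioning loop of A, characterised over pvEnum
theorem pv_loop1 (l : List Int) (k : Nat) (b : List Int) (iE : List Nat) (c : List Int) (iO : List Nat) :
    (pvEnum k l).foldl
      (fun st (p : Nat × Int) =>
        if p.2 % 2 == 0 then (st.1 ++ [p.2], st.2.1 ++ [p.1], st.2.2.1, st.2.2.2)
        else (st.1, st.2.1, st.2.2.1 ++ [p.2], st.2.2.2 ++ [p.1]))
      ((b, iE, c, iO) : List Int × List Nat × List Int × List Nat)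
    = (b ++ l.filter (fun x => x % 2 == 0), iE ++ pvPosOf (fun x => x % 2 == 0) k l,
       c ++ l.filter (fun x => !(x % 2 == 0)), iO ++ pvPosOf (fun x => !(x % 2 == 0)) k l) := by
  induction l generalizing k b iE c iO with
  | nil => simp [pvEnum, pvPosOf]
  | cons x xs ih =>
    simp only [pvEnum, List.foldl_cons, pvPosOf, List.filter]
    by_cases h : (x % 2 == 0) = true
    · simp only [h, Bool.not_true, if_true, if_false]
      rw [ih]
      simp
    · simp only [h, if_false]
      rw [if_neg (by simpa using h), ih]
      have hx : (!(x % 2 == 0)) = true := by simpa using h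
      simp [hx]

theorem pv_zip_range_getD (I : List Nat) (V : List Int) (h : I.length ≤ V.length) :
    (List.range I.length).map (fun i => (I.getD i 0, V.getD i 0)) = I.zip V := by
  induction I generalizing V with
  | nil => rfl
  | cons i I' ih =>
    cases V with
    | nil => simp at h
    | cons v V' =>
      simp only [List.length_cons, List.range_succ_eq_map, List.map_cons, List.map_map]
      simp only [List.getD_cons_zero, List.zip_cons_cons]
      congr 1
      rw [← ih V' (by simpa using h)]
      apply List.map_congr_left
      intro j _
      simp [Function.comp, Nat.succ_eq_add_one]

theorem pv_scatter_shift (I : List Nat) (V : List Int) (y : Int) (l : List Int) :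
    ((I.map (· + 1)).zip V).foldl (fun acc (p : Nat × Int) => acc.set p.1 p.2) (y :: l)
    = y :: (I.zip V).foldl (fun acc (p : Nat × Int) => acc.set p.1 p.2) l := by
  induction I generalizing V y l with
  | nil => rfl
  | cons i I' ih =>
    cases V with
    | nil => rfl
    | cons v V' => simp [List.set_cons_succ, ih]

-- the heart: the two scatter passes of A equal B's single rebuilding pass
theorem pv_master (a es os : List Int)
    (hE : es.length = (a.filter (fun x => x % 2 == 0)).length)
    (hO : os.length = (a.filter (fun x => !(x % 2 == 0))).length) :
    ((pvPosOf (fun x => !(x % 2 == 0)) 0 a).zip os).foldl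
      (fun acc (p : Nat × Int) => acc.set p.1 p.2)
      (((pvPosOf (fun x => x % 2 == 0) 0 a).zip es).foldl
        (fun acc (p : Nat × Int) => acc.set p.1 p.2) a)
    = pvRebuild a es os := by
  induction a generalizing es os with
  | nil =>
    simp [pvPosOf, pvRebuild]
  | cons x xs ih =>
    by_cases h : (x % 2 == 0) = true
    · obtain ⟨e, es', rfl⟩ : ∃ e es', es = e :: es' := by
        cases es with
        | nil => simp [List.filter, h] at hE
        | cons e es' => exact ⟨e, es', rfl⟩
      rw [show pvPosOf (fun x => x % 2 == 0) 0 (x :: xs)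
            = 0 :: (pvPosOf (fun x => x % 2 == 0) 0 xs).map (· + 1) by
          simp [pvPosOf, h, pv_posOf_shift]]
      rw [show pvPosOf (fun x => !(x % 2 == 0)) 0 (x :: xs)
            = (pvPosOf (fun x => !(x % 2 == 0)) 0 xs).map (· + 1) by
          simp [pvPosOf, h, pv_posOf_shift]]
      simp only [List.zip_cons_cons, List.foldl_cons, List.set_cons_zero]
      rw [pv_scatter_shift, pv_scatter_shift,
        show pvRebuild (x :: xs) (e :: es') os = e :: pvRebuild xs es' os by simp [pvRebuild, h]]
      exact congrArg _ (ih es' os (by simpa [List.filter, h] using hE)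
        (by simpa [List.filter, h] using hO))
    · obtain ⟨o, os', rfl⟩ : ∃ o os', os = o :: os' := by
        cases os with
        | nil => simp [List.filter, h] at hO
        | cons o os' => exact ⟨o, os', rfl⟩
      rw [show pvPosOf (fun x => x % 2 == 0) 0 (x :: xs)
            = (pvPosOf (fun x => x % 2 == 0) 0 xs).map (· + 1) by
          simp [pvPosOf, h, pv_posOf_shift]]
      rw [show pvPosOf (fun x => !(x % 2 == 0)) 0 (x :: xs)
            = 0 :: (pvPosOf (fun x => !(x % 2 == 0)) 0 xs).map (· + 1) by
          simp [pvPosOf, h, pv_posOf_shift]]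
      rw [pv_scatter_shift]
      simp only [List.zip_cons_cons, List.foldl_cons, List.set_cons_zero]
      rw [pv_scatter_shift,
        show pvRebuild (x :: xs) es (o :: os') = o :: pvRebuild xs es os' by simp [pvRebuild, h]]
      exact congrArg _ (ih es os' (by simpa [List.filter, h] using hE)
        (by simpa [List.filter, h] using hO))

-- ----- insertion-sort (ascending) -----

theorem pvInsLe_perm (key : Int) (l : List Int) : (pvInsLe key l).Perm (key :: l) := by
  induction l with
  | nil => simp [pvInsLe]
  | cons x xs ih =>
    simp only [pvInsLe]
    by_cases h : x ≤ key
    · simp only [h, if_pos]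
      exact (ih.cons x).trans (List.Perm.swap key x xs)
    · simp [h]

theorem pvInsLe_length (key : Int) (l : List Int) : (pvInsLe key l).length = l.length + 1 :=
  (pvInsLe_perm key l).length_eq

theorem pvInsLe_pairwise (key : Int) (l : List Int) (h : l.Pairwise (· ≤ ·)) :
    (pvInsLe key l).Pairwise (· ≤ ·) := by
  induction l with
  | nil => simp [pvInsLe]
  | cons x xs ih =>
    rcases List.pairwise_cons.mp h with ⟨hx, hxs⟩
    simp only [pvInsLe]
    by_cases hle : x ≤ key
    · simp only [hle, if_pos]
      refine List.pairwise_cons.mpr ⟨?_, ih hxs⟩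
      intro y hy
      rcases List.mem_cons.mp ((pvInsLe_perm key xs).mem_iff.mp hy) with rfl | hmem
      · exact hle
      · exact hx y hmem
    · simp only [hle, if_neg, not_false_iff]
      refine List.pairwise_cons.mpr ⟨?_, h⟩
      intro y hy
      rcases List.mem_cons.mp hy with rfl | hmem
      · omega
      · exact le_trans (by omega) (hx y hmem)

theorem pvInsLe_all_le (key : Int) (l : List Int) (h : ∀ x ∈ l, x ≤ key) :
    pvInsLe key l = l ++ [key] := by
  induction l with
  | nil => rfl
  | cons x xs ih =>
    simp only [pvInsLe, h x (by simp), if_pos]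
    rw [ih (fun y hy => h y (by simp [hy]))]
    simp

theorem pvInsLe_append_last (key w : Int) (l : List Int) (h : key < w) :
    pvInsLe key (l ++ [w]) = pvInsLe key l ++ [w] := by
  induction l with
  | nil => simp [pvInsLe, not_le.mpr h]
  | cons x xs ih =>
    simp only [List.cons_append, pvInsLe]
    by_cases hx : x ≤ key <;> simp [hx, ih]

theorem pv_getD_mid (l : List Int) (x : Int) (r : List Int) :
    (l ++ x :: r).getD l.length 0 = x := by
  induction l with
  | nil => rfl
  | cons y ys ih => simpa using ih

theorem pv_set_mid (l : List Int) (x v : Int) (r : List Int) :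
    (l ++ x :: r).set l.length v = l ++ v :: r := by
  induction l with
  | nil => rfl
  | cons y ys ih => simpa using ih

theorem pvAscWhile_eq (l₁ : List Int) : ∀ (z : Int) (l₂ : List Int) (key : Int),
    l₁.Pairwise (· ≤ ·) →
    pvAscWhile (l₁ ++ z :: l₂) key l₁.length = pvInsLe key l₁ ++ l₂ := by
  induction l₁ using List.reverseRecOn with
  | nil => intro z l₂ key _; simp [pvAscWhile, pvInsLe]
  | append_singleton l₁' w ih =>
    intro z l₂ key hsorted
    have hlen : (l₁' ++ [w]).length = l₁'.length + 1 := by simp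
    rw [hlen]
    have hpw : l₁'.Pairwise (· ≤ ·) ∧ ∀ x ∈ l₁', x ≤ w := by
      rw [List.pairwise_append] at hsorted
      exact ⟨hsorted.1, fun x hx => hsorted.2.2 x hx w (by simp)⟩
    have harr : l₁' ++ [w] ++ z :: l₂ = l₁' ++ w :: z :: l₂ := by simp
    rw [harr]
    simp only [pvAscWhile, pv_getD_mid]
    by_cases hw : w ≤ key
    · simp only [hw, if_pos]
      have : l₁' ++ w :: z :: l₂ = (l₁' ++ [w]) ++ z :: l₂ := by simp
      rw [this]
      have : l₁'.length + 1 = (l₁' ++ [w]).length := by simp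
      rw [this, pv_set_mid]
      rw [pvInsLe_all_le key (l₁' ++ [w])
        (by intro x hx; rcases List.mem_append.mp hx with h | h
            · exact le_trans (hpw.2 x h) hw
            · simp at h; omega)]
      simp
    · simp only [hw, if_neg, not_false_iff]
      have : l₁' ++ w :: z :: l₂ = (l₁' ++ [w]) ++ z :: l₂ := by simp
      rw [this]
      have h2 : l₁'.length + 1 = (l₁' ++ [w]).length := by simp
      rw [h2, pv_set_mid]
      have h3 : l₁' ++ [w] ++ w :: l₂ = l₁' ++ w :: w :: l₂ := by simp
      rw [h3, ih w (w :: l₂) key hpw.1, pvInsLe_append_last key w l₁' (by omega)]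
      simp

theorem pvAsc_fold (a : List Int) : ∀ (n s : Nat) (lst : List Int),
    lst.length = s → lst.Pairwise (· ≤ ·) →
    (List.range' s n).foldl
      (fun lst j => pvAscWhile (lst ++ [a.getD j 0]) (a.getD j 0) j) lst
    = ((List.range' s n).map (fun j => a.getD j 0)).foldl (fun l k => pvInsLe k l) lst := by
  intro n
  induction n with
  | zero => intro s lst _ _; rfl
  | succ n ih =>
    intro s lst hlen hpw
    have hr : List.range' s (n + 1) = s :: List.range' (s + 1) n := by
      simp [List.range'_succ]
    have hstep : pvAscWhile (lst ++ [a.getD s 0]) (a.getD s 0) s = pvInsLe (a.getD s 0) lst := by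
      have h0 := pvAscWhile_eq lst (a.getD s 0) [] (a.getD s 0) hpw
      rw [hlen] at h0
      simpa using h0
    rw [hr]
    simp only [List.foldl_cons, List.map_cons, hstep]
    exact ih (s + 1) _ (by rw [pvInsLe_length]; omega) (pvInsLe_pairwise _ _ hpw)

theorem pv_foldl_insLe_perm (vals lst : List Int) :
    (vals.foldl (fun l k => pvInsLe k l) lst).Perm (lst ++ vals) := by
  induction vals generalizing lst with
  | nil => simp
  | cons v vs ih =>
    simp only [List.foldl_cons]
    refine (ih (pvInsLe v lst)).trans (((pvInsLe_perm v lst).append_right vs).trans ?_)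
    simpa using (List.perm_middle (a := v) (l₁ := lst) (l₂ := vs)).symm

theorem pv_foldl_insLe_pairwise (vals lst : List Int) (h : lst.Pairwise (· ≤ ·)) :
    (vals.foldl (fun l k => pvInsLe k l) lst).Pairwise (· ≤ ·) := by
  induction vals generalizing lst with
  | nil => exact h
  | cons v vs ih => exact ih _ (pvInsLe_pairwise v lst h)

theorem pv_tail_vals (x : Int) (xs : List Int) :
    (List.range' 1 xs.length).map (fun j => (x :: xs).getD j 0) = xs := by
  rw [List.range'_eq_map_range, List.map_map]
  have : ((fun j => (x :: xs).getD j 0) ∘ fun i => 1 + i) = fun i => xs.getD i 0 := by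
    funext i
    simp [Function.comp, Nat.add_comm 1 i]
  rw [this, pv_map_range_getD]

theorem pvAsc_spec (b : List Int) (hb : b ≠ []) :
    (pvInsertionSort_Asc b).Perm b ∧ (pvInsertionSort_Asc b).Pairwise (· ≤ ·) := by
  obtain ⟨x, xs, rfl⟩ := List.exists_cons_of_ne_nil hb
  unfold pvInsertionSort_Asc
  by_cases h1 : ((x :: xs).length == 1) = true
  · have hnil : xs = [] := by
      have h2 : (x :: xs).length = 1 := by simpa using h1
      simpa using h2
    subst hnil
    simp [h1]
  · rw [if_neg (by simpa using h1)]
    have hlen : (x :: xs).length - 1 = xs.length := by simp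
    rw [hlen]
    have hhead : (x :: xs).headD 0 = x := rfl
    rw [hhead]
    rw [pvAsc_fold (x :: xs) xs.length 1 [x] (by simp) (by simp)]
    rw [pv_tail_vals]
    constructor
    · exact (pv_foldl_insLe_perm xs [x]).trans (by simp)
    · exact pv_foldl_insLe_pairwise xs [x] (by simp)

theorem pvAsc_eq_sorted (b : List Int) (hb : b ≠ []) :
    PySem.List.sorted b (fun x => x) false = pvInsertionSort_Asc b := by
  obtain ⟨hperm, hpw⟩ := pvAsc_spec b hb
  exact PySem.List.sorted_id_eq_of_perm_of_pairwise b _ hperm hpw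

-- ----- insertion-sort (descending) -----

theorem pvInsGe_perm (key : Int) (l : List Int) : (pvInsGe key l).Perm (key :: l) := by
  induction l with
  | nil => simp [pvInsGe]
  | cons x xs ih =>
    simp only [pvInsGe]
    by_cases h : key ≤ x
    · simp only [h, if_pos]
      exact (ih.cons x).trans (List.Perm.swap key x xs)
    · simp [h]

theorem pvInsGe_length (key : Int) (l : List Int) : (pvInsGe key l).length = l.length + 1 :=
  (pvInsGe_perm key l).length_eq

theorem pvInsGe_pairwise (key : Int) (l : List Int) (h : l.Pairwise (fun a b => b ≤ a)) :
    (pvInsGe key l).Pairwise (fun a b => b ≤ a) := by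
  induction l with
  | nil => simp [pvInsGe]
  | cons x xs ih =>
    rcases List.pairwise_cons.mp h with ⟨hx, hxs⟩
    simp only [pvInsGe]
    by_cases hle : key ≤ x
    · simp only [hle, if_pos]
      refine List.pairwise_cons.mpr ⟨?_, ih hxs⟩
      intro y hy
      rcases List.mem_cons.mp ((pvInsGe_perm key xs).mem_iff.mp hy) with rfl | hmem
      · exact hle
      · exact hx y hmem
    · simp only [hle, if_neg, not_false_iff]
      refine List.pairwise_cons.mpr ⟨?_, h⟩
      intro y hy
      rcases List.mem_cons.mp hy with rfl | hmem
      · omega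
      · exact le_trans (hx y hmem) (by omega)

theorem pvInsGe_all_ge (key : Int) (l : List Int) (h : ∀ x ∈ l, key ≤ x) :
    pvInsGe key l = l ++ [key] := by
  induction l with
  | nil => rfl
  | cons x xs ih =>
    simp only [pvInsGe, h x (by simp), if_pos]
    rw [ih (fun y hy => h y (by simp [hy]))]
    simp

theorem pvInsGe_append_last (key w : Int) (l : List Int) (h : w < key) :
    pvInsGe key (l ++ [w]) = pvInsGe key l ++ [w] := by
  induction l with
  | nil => simp [pvInsGe, not_le.mpr h]
  | cons x xs ih =>
    simp only [List.cons_append, pvInsGe]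
    by_cases hx : key ≤ x <;> simp [hx, ih]

theorem pvDescWhile_eq (l₁ : List Int) : ∀ (z : Int) (l₂ : List Int) (key : Int),
    l₁.Pairwise (fun a b => b ≤ a) →
    pvDescWhile (l₁ ++ z :: l₂) key l₁.length = pvInsGe key l₁ ++ l₂ := by
  induction l₁ using List.reverseRecOn with
  | nil => intro z l₂ key _; simp [pvDescWhile, pvInsGe]
  | append_singleton l₁' w ih =>
    intro z l₂ key hsorted
    have hlen : (l₁' ++ [w]).length = l₁'.length + 1 := by simp
    rw [hlen]
    have hpw : l₁'.Pairwise (fun a b => b ≤ a) ∧ ∀ x ∈ l₁', w ≤ x := by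
      rw [List.pairwise_append] at hsorted
      exact ⟨hsorted.1, fun x hx => hsorted.2.2 x hx w (by simp)⟩
    have harr : l₁' ++ [w] ++ z :: l₂ = l₁' ++ w :: z :: l₂ := by simp
    rw [harr]
    simp only [pvDescWhile, pv_getD_mid]
    by_cases hw : key ≤ w
    · simp only [hw, if_pos]
      have : l₁' ++ w :: z :: l₂ = (l₁' ++ [w]) ++ z :: l₂ := by simp
      rw [this]
      have : l₁'.length + 1 = (l₁' ++ [w]).length := by simp
      rw [this, pv_set_mid]
      rw [pvInsGe_all_ge key (l₁' ++ [w])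
        (by intro x hx; rcases List.mem_append.mp hx with h | h
            · exact le_trans hw (hpw.2 x h)
            · simp at h; omega)]
      simp
    · simp only [hw, if_neg, not_false_iff]
      have : l₁' ++ w :: z :: l₂ = (l₁' ++ [w]) ++ z :: l₂ := by simp
      rw [this]
      have h2 : l₁'.length + 1 = (l₁' ++ [w]).length := by simp
      rw [h2, pv_set_mid]
      have h3 : l₁' ++ [w] ++ w :: l₂ = l₁' ++ w :: w :: l₂ := by simp
      rw [h3, ih w (w :: l₂) key hpw.1, pvInsGe_append_last key w l₁' (by omega)]
      simp

theorem pvDesc_fold (a : List Int) : ∀ (n s : Nat) (lst : List Int),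
    lst.length = s → lst.Pairwise (fun a b => b ≤ a) →
    (List.range' s n).foldl
      (fun lst j => pvDescWhile (lst ++ [a.getD j 0]) (a.getD j 0) j) lst
    = ((List.range' s n).map (fun j => a.getD j 0)).foldl (fun l k => pvInsGe k l) lst := by
  intro n
  induction n with
  | zero => intro s lst _ _; rfl
  | succ n ih =>
    intro s lst hlen hpw
    have hr : List.range' s (n + 1) = s :: List.range' (s + 1) n := by
      simp [List.range'_succ]
    have hstep : pvDescWhile (lst ++ [a.getD s 0]) (a.getD s 0) s = pvInsGe (a.getD s 0) lst := by
      have h0 := pvDescWhile_eq lst (a.getD s 0) [] (a.getD s 0) hpw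
      rw [hlen] at h0
      simpa using h0
    rw [hr]
    simp only [List.foldl_cons, List.map_cons, hstep]
    exact ih (s + 1) _ (by rw [pvInsGe_length]; omega) (pvInsGe_pairwise _ _ hpw)

theorem pv_foldl_insGe_perm (vals lst : List Int) :
    (vals.foldl (fun l k => pvInsGe k l) lst).Perm (lst ++ vals) := by
  induction vals generalizing lst with
  | nil => simp
  | cons v vs ih =>
    simp only [List.foldl_cons]
    refine (ih (pvInsGe v lst)).trans (((pvInsGe_perm v lst).append_right vs).trans ?_)
    simpa using (List.perm_middle (a := v) (l₁ := lst) (l₂ := vs)).symm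

theorem pv_foldl_insGe_pairwise (vals lst : List Int) (h : lst.Pairwise (fun a b => b ≤ a)) :
    (vals.foldl (fun l k => pvInsGe k l) lst).Pairwise (fun a b => b ≤ a) := by
  induction vals generalizing lst with
  | nil => exact h
  | cons v vs ih => exact ih _ (pvInsGe_pairwise v lst h)

theorem pvDesc_spec (c : List Int) (hc : c ≠ []) :
    (pvInsertionSort_Desc c).Perm c ∧ (pvInsertionSort_Desc c).Pairwise (fun a b => b ≤ a) := by
  obtain ⟨x, xs, rfl⟩ := List.exists_cons_of_ne_nil hc
  unfold pvInsertionSort_Desc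
  by_cases h1 : ((x :: xs).length == 1) = true
  · have hnil : xs = [] := by
      have h2 : (x :: xs).length = 1 := by simpa using h1
      simpa using h2
    subst hnil
    simp [h1]
  · rw [if_neg (by simpa using h1)]
    have hlen : (x :: xs).length - 1 = xs.length := by simp
    rw [hlen]
    have hhead : (x :: xs).headD 0 = x := rfl
    rw [hhead]
    rw [pvDesc_fold (x :: xs) xs.length 1 [x] (by simp) (by simp)]
    rw [pv_tail_vals]
    constructor
    · exact (pv_foldl_insGe_perm xs [x]).trans (by simp)
    · exact pv_foldl_insGe_pairwise xs [x] (by simp)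

-- descending analogue of PySem.List.sorted_id_eq_of_perm_of_pairwise (identity key, non-strict)
theorem pv_sorted_rev_unique (xs ys : List Int) (hperm : ys.Perm xs)
    (hpw : ys.Pairwise (fun a b => b ≤ a)) :
    PySem.List.sorted xs (fun x => x) true = ys := by
  apply List.eq_of_perm_of_sorted
    (fun a b _ _ h1 h2 => le_antisymm h2 h1)
    (by simpa using PySem.List.sorted_pairwise_rev xs (fun x : Int => x))
    hpw
  exact (PySem.List.sorted_perm xs (fun x : Int => x) true).trans hperm.symm

theorem pvDesc_eq_sorted (c : List Int) (hc : c ≠ []) :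
    PySem.List.sorted c (fun x => x) true = pvInsertionSort_Desc c := by
  obtain ⟨hperm, hpw⟩ := pvDesc_spec c hc
  exact pv_sorted_rev_unique c _ hperm hpw

-- ----- assembly -----

-- scatter loop over range/getD rewritten as a fold over the zipped pairs
theorem pv_scatter_conv (I : List Nat) (V : List Int) (a : List Int) (h : I.length ≤ V.length) :
    (List.range I.length).foldl (fun acc i => acc.set (I.getD i 0) (V.getD i 0)) a
    = (I.zip V).foldl (fun acc (p : Nat × Int) => acc.set p.1 p.2) a := by
  rw [← pv_zip_range_getD I V h, List.foldl_map]

theorem insertionSort_odd_even_eq (a : List Int) :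
    insertionSort_odd_even a = insertionSort_odd_even_alt a := by
  unfold insertionSort_odd_even insertionSort_odd_even_alt
  rw [show (fun x : Int => x % 2 != 0) = fun x => !(x % 2 == 0) from rfl]
  have h1 := pv_loop1 a 0 [] [] [] []
  rw [← pv_enum_eq a, List.foldl_map] at h1
  simp only [List.nil_append] at h1
  rw [h1]
  simp only
  rw [← pv_master a
    (PySem.List.sorted (a.filter (fun x => x % 2 == 0)) (fun x => x) false)
    (PySem.List.sorted (a.filter (fun x => !(x % 2 == 0))) (fun x => x) true)
    (by rw [PySem.List.length_sorted]) (by rw [PySem.List.length_sorted])]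
  have hE : ∀ l : List Int,
      (if 0 < (a.filter (fun x => x % 2 == 0)).length then
        (List.range (pvPosOf (fun x => x % 2 == 0) 0 a).length).foldl
          (fun acc i => acc.set ((pvPosOf (fun x => x % 2 == 0) 0 a).getD i 0)
            ((pvInsertionSort_Asc (a.filter (fun x => x % 2 == 0))).getD i 0)) l
       else l)
      = ((pvPosOf (fun x => x % 2 == 0) 0 a).zip
          (PySem.List.sorted (a.filter (fun x => x % 2 == 0)) (fun x => x) false)).foldl
          (fun acc (p : Nat × Int) => acc.set p.1 p.2) l := by
    intro l
    by_cases hb : a.filter (fun x => x % 2 == 0) = []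
    · have hpos : pvPosOf (fun x => x % 2 == 0) 0 a = [] :=
        List.eq_nil_of_length_eq_zero (by rw [pv_posOf_length, hb]; rfl)
      simp [hb, hpos]
    · rw [if_pos (List.length_pos_iff.mpr hb)]
      rw [pv_scatter_conv _ _ l
        (by rw [pv_posOf_length, (pvAsc_spec _ hb).1.length_eq])]
      rw [pvAsc_eq_sorted _ hb]
  have hO : ∀ l : List Int,
      (if 0 < (a.filter (fun x => !(x % 2 == 0))).length then
        (List.range (pvPosOf (fun x => !(x % 2 == 0)) 0 a).length).foldl
          (fun acc i => acc.set ((pvPosOf (fun x => !(x % 2 == 0)) 0 a).getD i 0)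
            ((pvInsertionSort_Desc (a.filter (fun x => !(x % 2 == 0)))).getD i 0)) l
       else l)
      = ((pvPosOf (fun x => !(x % 2 == 0)) 0 a).zip
          (PySem.List.sorted (a.filter (fun x => !(x % 2 == 0))) (fun x => x) true)).foldl
          (fun acc (p : Nat × Int) => acc.set p.1 p.2) l := by
    intro l
    by_cases hc : a.filter (fun x => !(x % 2 == 0)) = []
    · have hpos : pvPosOf (fun x => !(x % 2 == 0)) 0 a = [] :=
        List.eq_nil_of_length_eq_zero (by rw [pv_posOf_length, hc]; rfl)
      simp [hc, hpos]
    · rw [if_pos (List.length_pos_iff.mpr hc)]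
      rw [pv_scatter_conv _ _ l
        (by rw [pv_posOf_length, (pvDesc_spec _ hc).1.length_eq])]
      rw [pvDesc_eq_sorted _ hc]
  rw [hE a, hO _]

-- ===== VERDICT (by name: the statement is the Claim_ definition above) =====
theorem insertionSort_odd_even_spec : Claim_equal_insertionSort_odd_even := by
  intro a _
  exact insertionSort_odd_even_eq a
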